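-- pv_equiv track=rewrite | github.com/Sorananakiii/PythonProgramming | Other/Other/untitled37.py | multi_word_search
-- ===== SOURCE A (Python) =====
-- def multi_word_search(doc_list, keywords):
--     """
--     Takes list of documents (each document is a string) and a list of keywords.
--     Returns a dictionary where each key is a keyword, and the value is a list of indices
--     (from doc_list) of the documents containing that keyword
--
--     >>> doc_list = ["The Learn Python Challenge Casino.", "They bought a car and a casino", "Casinoville"]
--     >>> keywords = ['casino', 'they']
--     >>> multi_word_search(doc_list, keywords)
--     {'casino': [0, 1], 'they': [1]}
--     """
--     out = []
--     for keyword in keywords: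
--         indices = []
--         for i, doc in enumerate(doc_list):
--
--             tokens = doc.split()
--             normalized = [token.rstrip('.,').lower() for token in tokens]
--
--
--             if keyword.lower() in normalized:
--                 indices.append(i)
--         out.append(indices)
--
--     return dict(zip(keywords, out))
-- ===== SOURCE B (Python) =====
-- def multi_word_search(doc_list, keywords):
--     # Build a word -> document-indices inverted index in one pass over the docs,
--     # then answer each keyword by a single lookup.
--     index = {}
--     for i, doc in enumerate(doc_list):
--         for w in {t.rstrip('.,').lower() for t in doc.split()}:
--             index.setdefault(w, []).append(i)
--     return {kw: index.get(kw.lower(), []) for kw in keywords}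
-- ===== Notes on version B (the rewrite author's own statement) =====
-- stated objective: faster
-- what changed: Instead of re-tokenizing and re-normalizing every document for every keyword, B makes one pass over the documents building an inverted word->indices index and answers each keyword by a single dictionary lookup.
import Mathlib
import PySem

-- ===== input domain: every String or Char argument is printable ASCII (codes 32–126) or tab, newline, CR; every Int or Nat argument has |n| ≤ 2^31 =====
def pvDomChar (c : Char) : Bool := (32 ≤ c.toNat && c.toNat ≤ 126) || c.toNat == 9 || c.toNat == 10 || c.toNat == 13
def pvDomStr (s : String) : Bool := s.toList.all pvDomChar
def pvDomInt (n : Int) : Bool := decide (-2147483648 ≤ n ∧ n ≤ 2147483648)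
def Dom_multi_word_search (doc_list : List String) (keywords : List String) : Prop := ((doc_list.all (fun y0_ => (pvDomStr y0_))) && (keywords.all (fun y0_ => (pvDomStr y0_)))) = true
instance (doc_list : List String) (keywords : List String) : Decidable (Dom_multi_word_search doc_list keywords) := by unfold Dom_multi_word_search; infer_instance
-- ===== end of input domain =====

-- B replaces A's per-keyword rescan of every document by a single inverted word→indices
-- index built once over the documents; each keyword is then a single lookup (objective: faster).

-- ===== PORT A =====
-- token.rstrip('.,'): PySem has no right-only strip with a char set, so ported by hand:
-- drop trailing characters from {'.', ','} (exact for str.rstrip('.,')).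
def pvRstripPC (s : String) : String :=
  String.ofList ((s.toList.reverse.dropWhile (fun c => c == '.' || c == ',')).reverse)

-- token.rstrip('.,').lower()
def pvNormTok (t : String) : String := PySem.Str.lower (pvRstripPC t)

def multi_word_search (doc_list : List String) (keywords : List String) : List (String × List Int) :=
  let out := keywords.foldl (fun acc kw =>
    let indices := (PySem.List.enumerate doc_list).foldl (fun ind p =>
      let normalized := (PySem.Str.split₀ p.2).map pvNormTok
      if normalized.contains (PySem.Str.lower kw) then ind ++ [p.1] else ind)
      ([] : List Int)
    acc ++ [indices]) ([] : List (List Int))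
  (PySem.Dict.ofList (keywords.zip out)).items

-- ===== PORT B =====
def multi_word_search_alt (doc_list : List String) (keywords : List String) : List (String × List Int) :=
  let index := (PySem.List.enumerate doc_list).foldl (fun d p =>
      (PySem.Set.ofList ((PySem.Str.split₀ p.2).map pvNormTok)).foldl
        (fun d w => d.modify w ([] : List Int) (fun l => l ++ [p.1])) d)
    PySem.Dict.empty
  (keywords.foldl (fun d kw => d.insert kw (index.getD (PySem.Str.lower kw) []))
    PySem.Dict.empty).items

-- ===== PRECONDITION & SPEC =====
def Spec_multi_word_search (doc_list : List String) (keywords : List String) (out : List (String × List Int)) : Prop := out = multi_word_search_alt doc_list keywords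
instance (doc_list : List String) (keywords : List String) (out : List (String × List Int)) : Decidable (Spec_multi_word_search doc_list keywords out) := by unfold Spec_multi_word_search; infer_instance

-- ===== CLAIM (what is proved, stated in full; the proofs are below) =====
def Claim_equal_multi_word_search : Prop := ∀ (doc_list : List String) (keywords : List String), Dom_multi_word_search doc_list keywords → Spec_multi_word_search doc_list keywords (multi_word_search doc_list keywords)

-- ===== LEMMAS AND PROOFS =====

-- Inner loop of B's index construction: folding a duplicate-free word list S with
-- "append i to the entry of w" extends the entry of w by [i] iff w ∈ S.
theorem pv_inner_getD (S : List String) (hS : S.Nodup) (d : PySem.Dict String (List Int))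
    (w : String) (i : Int) :
    ((S.foldl (fun d w' => d.modify w' ([] : List Int) (fun l => l ++ [i])) d).getD w []) =
      d.getD w [] ++ (if w ∈ S then [i] else []) := by
  induction S generalizing d with
  | nil => simp
  | cons a S ih =>
    rcases List.nodup_cons.mp hS with ⟨ha, hS'⟩
    simp only [List.foldl_cons]
    rw [ih hS']
    by_cases hw : w = a
    · subst hw
      simp [ha]
    · rw [PySem.Dict.getD_modify]
      simp [hw]

-- Unfolding B's outer index loop: the entry of w after processing a prefix of the
-- enumerated documents is the accumulated list of indices of documents containing w.
theorem pv_index_getD (es : List (Int × String)) (d : PySem.Dict String (List Int)) (w : String) :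
    ((es.foldl (fun d p =>
        (PySem.Set.ofList ((PySem.Str.split₀ p.2).map pvNormTok)).foldl
          (fun d w' => d.modify w' ([] : List Int) (fun l => l ++ [p.1])) d) d).getD w []) =
      es.foldl (fun l p =>
        if ((PySem.Str.split₀ p.2).map pvNormTok).contains w then l ++ [p.1] else l)
        (d.getD w []) := by
  induction es generalizing d with
  | nil => rfl
  | cons p es ih =>
    simp only [List.foldl_cons]
    rw [ih, pv_inner_getD _ (PySem.Set.nodup_ofList _) d w p.1]
    congr 1
    by_cases hmem : w ∈ (PySem.Str.split₀ p.2).map pvNormTok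
    · simp [hmem, PySem.Set.mem_ofList]
    · simp [hmem, PySem.Set.mem_ofList]

-- A's accumulation of the per-keyword index lists is a map.
theorem pv_foldl_append_map {α β : Type} (l : List α) (f : α → β) (acc : List β) :
    l.foldl (fun acc x => acc ++ [f x]) acc = acc ++ l.map f := by
  induction l generalizing acc with
  | nil => simp
  | cons a l ih => simp [ih]

-- Building dict(zip(l, [f(x) for x in l])) pairwise equals inserting g(x) per key when f = g.
theorem pv_dict_zip {ν : Type} {f g : String → ν} (h : ∀ kw, f kw = g kw) (l : List String)
    (d : PySem.Dict String ν) :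
    (l.zip (l.map f)).foldl (fun d p => d.insert p.1 p.2) d =
      l.foldl (fun d kw => d.insert kw (g kw)) d := by
  induction l generalizing d with
  | nil => rfl
  | cons a l ih => simp only [List.map_cons, List.zip_cons_cons, List.foldl_cons, h a, ih]

-- ===== VERDICT (by name: the statement is the Claim_ definition above) =====
theorem multi_word_search_spec : Claim_equal_multi_word_search := by
  intro doc_list keywords _
  show multi_word_search doc_list keywords = multi_word_search_alt doc_list keywords
  unfold multi_word_search multi_word_search_alt
  simp only [pv_foldl_append_map, List.nil_append]
  show (PySem.Dict.ofList _).items = _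
  unfold PySem.Dict.ofList PySem.Dict.update
  congr 1
  apply pv_dict_zip
  intro kw
  rw [pv_index_getD]
  rfl
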